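-- pv_equiv track=rewrite | github.com/lkmcl37/CRF-based-Named-Entity-Recognizer | feature_extractor.py | is_digit_and_sym
-- ===== SOURCE A (Python) =====
-- def is_digit_and_sym(token, p):
--     bd = False
--     bdd = False
--     for c in token:
--         if c.isdigit():
--             bd = True
--         elif c == p:
--             bdd = True
--         else:
--             return False
--     return bd and bdd
-- ===== SOURCE B (Python) =====
-- def is_digit_and_sym(token, p):
--     chars = set(token)
--     digits = {c for c in chars if c.isdigit()}
--     others = chars - digits
--     return bool(digits) and others == {p}
-- ===== Notes on version B (the rewrite author's own statement) =====
-- stated objective: simpler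
-- what changed: Replaced the two-flag early-exit loop with set reasoning: partition the distinct characters into digits and the rest and require a nonempty digit part and the rest equal to {p}.
import Mathlib
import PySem

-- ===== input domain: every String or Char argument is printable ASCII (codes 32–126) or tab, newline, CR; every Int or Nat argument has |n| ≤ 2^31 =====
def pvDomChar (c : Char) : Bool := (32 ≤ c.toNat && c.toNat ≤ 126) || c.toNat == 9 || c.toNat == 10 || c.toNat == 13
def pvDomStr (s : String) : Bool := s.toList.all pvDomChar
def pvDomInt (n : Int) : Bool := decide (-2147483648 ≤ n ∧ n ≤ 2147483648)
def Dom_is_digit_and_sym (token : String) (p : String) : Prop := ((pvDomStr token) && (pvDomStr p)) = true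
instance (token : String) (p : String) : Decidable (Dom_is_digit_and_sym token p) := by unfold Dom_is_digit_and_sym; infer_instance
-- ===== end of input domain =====

-- B replaces A's two-flag early-exit loop by set partition/equality over the distinct characters (objective: simpler).

-- ===== PORT A =====
-- the for-loop over token with flags bd, bdd and an early 'return False'
def pvLoopA (p : String) : List Char → Bool → Bool → Bool
  | [], bd, bdd => bd && bdd
  | c :: cs, bd, bdd =>
    if PySem.Chars.isdigit c then pvLoopA p cs true bdd
    else if String.mk [c] == p then pvLoopA p cs bd true
    else false

def is_digit_and_sym (token : String) (p : String) : Bool :=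
  pvLoopA p token.toList false false

-- ===== PORT B =====
def is_digit_and_sym_alt (token : String) (p : String) : Bool :=
  let chars : PySem.Set Char := PySem.Set.ofList token.toList
  let digits : PySem.Set Char := chars.filter PySem.Chars.isdigit   -- {c for c in chars if c.isdigit()}
  let others : PySem.Set Char := PySem.Set.diff chars digits        -- chars - digits
  !digits.isEmpty && PySem.Set.equal (others.map (fun c => String.mk [c])) (PySem.Set.ofList [p])

-- ===== PRECONDITION & SPEC =====
def Spec_is_digit_and_sym (token : String) (p : String) (out : Bool) : Prop := out = is_digit_and_sym_alt token p
instance (token : String) (p : String) (out : Bool) : Decidable (Spec_is_digit_and_sym token p out) := by unfold Spec_is_digit_and_sym; infer_instance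

-- ===== CLAIM (what is proved, stated in full; the proofs are below) =====
def Claim_equal_is_digit_and_sym : Prop := ∀ (token : String) (p : String), Dom_is_digit_and_sym token p → Spec_is_digit_and_sym token p (is_digit_and_sym token p)

-- ===== LEMMAS AND PROOFS =====

-- characterisation of A's loop
theorem pvLoopA_char (p : String) (l : List Char) (bd bdd : Bool) :
    pvLoopA p l bd bdd =
      ((l.all (fun c => PySem.Chars.isdigit c || (String.mk [c] == p))) &&
       (bd || l.any PySem.Chars.isdigit) &&
       (bdd || l.any (fun c => !PySem.Chars.isdigit c && (String.mk [c] == p)))) := by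
  induction l generalizing bd bdd with
  | nil => simp [pvLoopA]
  | cons c cs ih =>
    by_cases hd : PySem.Chars.isdigit c = true
    · simp [pvLoopA, hd, ih]
    · by_cases hp : (String.mk [c] == p) = true
      · rw [pvLoopA, if_neg (by simp [hd]), if_pos hp, ih]
        simp [hd, hp]
      · simp [pvLoopA, hd, hp]

theorem main_eq (token p : String) :
    is_digit_and_sym token p = is_digit_and_sym_alt token p := by
  rw [Bool.eq_iff_iff]
  unfold is_digit_and_sym is_digit_and_sym_alt
  rw [pvLoopA_char]
  simp only [Bool.and_eq_true, Bool.or_eq_true, Bool.not_eq_true', List.all_eq_true,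
    List.any_eq_true, List.isEmpty_eq_false_iff_exists_mem, List.mem_filter,
    PySem.Set.equal_iff, List.mem_map, PySem.Set.mem_diff, PySem.Set.mem_ofList,
    List.mem_singleton, beq_iff_eq, Bool.false_or]
  constructor
  · rintro ⟨⟨hall, c1, hc1, hd1⟩, c0, hc0, hnd0, hp0⟩
    refine ⟨⟨c1, hc1, hd1⟩, fun x => ?_⟩
    constructor
    · rintro ⟨c, ⟨hc, hnd⟩, rfl⟩
      rcases hall c hc with h | h
      · exact absurd ⟨hc, h⟩ hnd
      · exact h
    · rintro rfl
      exact ⟨c0, ⟨hc0, fun h => by rw [hnd0] at h; exact absurd h.2 (by simp)⟩, hp0⟩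
  · rintro ⟨⟨c1, hc1, hd1⟩, heq⟩
    rcases (heq p).mpr rfl with ⟨c0, ⟨hc0, hnd0⟩, hp0⟩
    have hnd0' : PySem.Chars.isdigit c0 = false := by
      by_cases h : PySem.Chars.isdigit c0 = true
      · exact absurd ⟨hc0, h⟩ hnd0
      · simpa using h
    refine ⟨⟨fun c hc => ?_, c1, hc1, hd1⟩, c0, hc0, hnd0', hp0⟩
    by_cases hd : PySem.Chars.isdigit c = true
    · exact Or.inl hd
    · exact Or.inr ((heq (String.mk [c])).mp ⟨c, ⟨hc, fun h => hd h.2⟩, rfl⟩)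

-- ===== VERDICT (by name: the statement is the Claim_ definition above) =====
theorem is_digit_and_sym_spec : Claim_equal_is_digit_and_sym := by
  intro token p _
  exact main_eq token p
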